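-- pv_equiv track=rewrite | github.com/dogrunjp/FA_CMS | markup_kw.py | remove_overlapped
-- ===== SOURCE A (Python) =====
-- def remove_overlapped(dct):
--     # ポジションと単語長からキーワードのテキスト中の位置（=レンジ）を生成
--     ranged = []
--     for k, v in dct.items():
--         ranged.append((k,range(v, v + len(k))))
--
--     # 単語長の長いキーワードからkw_rangeに埋められたテキスト内のレンジを登録していく
--     kws = []
--     kw_range = set()
--     for s in ranged:
--         # 単語の重なりがある場合
--         if set(s[1]).intersection(kw_range):
--             pass
--         else:
--             kws.append(s[0])
--             kw_range = kw_range.union(set(s[1]))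
--     return kws
-- ===== SOURCE B (Python) =====
-- def remove_overlapped(dct):
--     # Sieve of intervals: repeatedly keep the first remaining keyword and
--     # discard every later one whose half-open interval intersects it; no
--     # accepted-set/occupied-position structure is maintained at all.
--     items = [(k, v, v + len(k)) for k, v in dct.items()]
--     kws = []
--     while items:
--         k, s, e = items[0]
--         kws.append(k)
--         items = [t for t in items[1:] if not (max(s, t[1]) < min(e, t[2]))]
--     return kws
-- ===== Notes on version B (the rewrite author's own statement) =====
-- stated objective: alternative
-- what changed: Replaces A's single greedy pass maintaining a set of all occupied integer positions with a sieve: repeatedly take the first remaining keyword and filter out every later one whose half-open endpoint interval intersects it by integer comparison, so no occupied-position set (or accepted list) exists at all.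
import Mathlib
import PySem

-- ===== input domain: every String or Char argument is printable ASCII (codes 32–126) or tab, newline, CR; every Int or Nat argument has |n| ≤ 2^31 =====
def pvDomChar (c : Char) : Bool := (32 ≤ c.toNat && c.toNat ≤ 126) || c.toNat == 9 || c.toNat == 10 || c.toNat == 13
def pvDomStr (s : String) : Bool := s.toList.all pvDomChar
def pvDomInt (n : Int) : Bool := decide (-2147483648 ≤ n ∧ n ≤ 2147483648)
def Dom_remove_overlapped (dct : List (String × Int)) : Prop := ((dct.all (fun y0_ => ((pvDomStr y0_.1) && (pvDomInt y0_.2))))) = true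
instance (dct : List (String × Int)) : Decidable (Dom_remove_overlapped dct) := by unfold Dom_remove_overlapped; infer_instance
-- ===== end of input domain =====

-- B replaces A's greedy pass over a set of occupied integer positions with a
-- sieve: keep the first remaining keyword, filter out later intersecting
-- intervals, repeat; same return value, a different algorithmic decomposition.

-- ===== PORT A =====
-- loop 'for s in ranged', state (kws, kw_range)
def pvALoop : List (String × List Int) → List String → PySem.Set Int → List String
  | [], kws, _ => kws
  | s :: rest, kws, kw_range =>
    if PySem.Set.inter (PySem.Set.ofList s.2) kw_range ≠ [] then
      pvALoop rest kws kw_range                      -- pass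
    else
      pvALoop rest (kws ++ [s.1]) (PySem.Set.union kw_range (PySem.Set.ofList s.2))

def remove_overlapped (dct : List (String × Int)) : List String :=
  let ranged := dct.map (fun kv => (kv.1, PySem.List.pyRange kv.2 (kv.2 + PySem.Str.len kv.1) 1))
  pvALoop ranged [] PySem.Set.empty

-- ===== PORT B =====
-- the intersection test 'max(s, t[1]) < min(e, t[2])'
def pvOv (s e s2 e2 : Int) : Bool := decide (max s s2 < min e e2)

-- the 'while items:' loop, state (items, kws)
def pvSieve : List (String × Int × Int) → List String → List String
  | [], kws => kws
  | (k, s, e) :: rest, kws =>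
    pvSieve (rest.filter (fun t => !pvOv s e t.2.1 t.2.2)) (kws ++ [k])
termination_by l => l.length
decreasing_by
  refine Nat.lt_succ_of_le ?_
  rw [List.length_unattach]
  exact le_trans (List.length_filter_le _ _) (by rw [List.length_attach])

def remove_overlapped_alt (dct : List (String × Int)) : List String :=
  pvSieve (dct.map (fun kv => (kv.1, kv.2, kv.2 + PySem.Str.len kv.1))) []

-- ===== PRECONDITION & SPEC =====
def Spec_remove_overlapped (dct : List (String × Int)) (out : List String) : Prop := out = remove_overlapped_alt dct
instance (dct : List (String × Int)) (out : List String) : Decidable (Spec_remove_overlapped dct out) := by unfold Spec_remove_overlapped; infer_instance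

-- ===== CLAIM (what is proved, stated in full; the proofs are below) =====
def Claim_equal_remove_overlapped : Prop := ∀ (dct : List (String × Int)), Dom_remove_overlapped dct → Spec_remove_overlapped dct (remove_overlapped dct)

-- ===== LEMMAS AND PROOFS =====

-- Bool: the interval of t is disjoint from the occupied-position set R
def pvDis (R : PySem.Set Int) (t : String × Int × Int) : Bool :=
  PySem.Set.inter (PySem.List.pyRange t.2.1 t.2.2 1) R == []

theorem pvDis_spec (R : PySem.Set Int) (t : String × Int × Int) :
    pvDis R t = true ↔ ∀ x : Int, t.2.1 ≤ x → x < t.2.2 → x ∉ R := by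
  simp only [pvDis, beq_iff_eq, List.eq_nil_iff_forall_not_mem, PySem.Set.mem_inter,
    PySem.List.mem_pyRange_one]
  constructor
  · intro h x h1 h2 hR; exact h x ⟨⟨h1, h2⟩, hR⟩
  · rintro h x ⟨⟨h1, h2⟩, hR⟩; exact h x h1 h2 hR

-- ofList of a pyRange keeps the same integer membership
theorem pvMem_ofList_range (a b x : Int) :
    x ∈ PySem.Set.ofList (PySem.List.pyRange a b 1) ↔ a ≤ x ∧ x < b := by
  rw [PySem.Set.mem_ofList, PySem.List.mem_pyRange_one]

-- disjointness from the enlarged set = disjointness before ∧ no interval overlap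
theorem pvDis_union (R : PySem.Set Int) (s e : Int) (t : String × Int × Int) :
    pvDis (PySem.Set.union R (PySem.Set.ofList (PySem.List.pyRange s e 1))) t =
      (!pvOv s e t.2.1 t.2.2 && pvDis R t) := by
  by_cases hov : pvOv s e t.2.1 t.2.2 = true
  · simp only [hov, Bool.not_true, Bool.false_and]
    rw [Bool.eq_false_iff, ne_eq, pvDis_spec]
    simp only [pvOv, decide_eq_true_eq] at hov
    intro h
    exact h (max s t.2.1) (by omega) (by omega)
      (by rw [PySem.Set.mem_union]; right; rw [pvMem_ofList_range]; omega)
  · rw [Bool.not_eq_true] at hov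
    simp only [hov, Bool.not_false, Bool.true_and]
    rw [Bool.eq_iff_iff, pvDis_spec, pvDis_spec]
    simp only [pvOv, decide_eq_false_iff_not, not_lt] at hov
    constructor
    · intro h x h1 h2 hR
      exact h x h1 h2 (by rw [PySem.Set.mem_union]; exact Or.inl hR)
    · intro h x h1 h2 hx
      rw [PySem.Set.mem_union, pvMem_ofList_range] at hx
      rcases hx with hR | hI
      · exact h x h1 h2 hR
      · omega

-- unfolding equation for the sieve step
theorem pvSieve_cons (k : String) (s e : Int) (rest : List (String × Int × Int)) (kws : List String) :
    pvSieve ((k, s, e) :: rest) kws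
      = pvSieve (rest.filter (fun t => !pvOv s e t.2.1 t.2.2)) (kws ++ [k]) := by
  simp [pvSieve]

-- A's branch condition is the negation of pvDis
theorem pvCond_iff (R : PySem.Set Int) (k : String) (s e : Int) :
    (PySem.Set.inter (PySem.Set.ofList (PySem.List.pyRange s e 1)) R ≠ []) ↔
      ¬ pvDis R (k, s, e) = true := by
  rw [pvDis_spec]
  simp only [ne_eq, List.eq_nil_iff_forall_not_mem, PySem.Set.mem_inter, PySem.Set.mem_ofList,
    PySem.List.mem_pyRange_one]
  push Not
  constructor
  · rintro ⟨x, ⟨h1, h2⟩, hR⟩; exact ⟨x, h1, h2, hR⟩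
  · rintro ⟨x, h1, h2, hR⟩; exact ⟨x, ⟨h1, h2⟩, hR⟩

-- main invariant: A's remaining loop vs B's sieve of the not-yet-covered items
theorem pvLoop_eq (dct : List (String × Int)) (kws : List String) (R : PySem.Set Int) :
    pvALoop (dct.map (fun kv => (kv.1, PySem.List.pyRange kv.2 (kv.2 + PySem.Str.len kv.1) 1))) kws R
      = pvSieve ((dct.map (fun kv => (kv.1, kv.2, kv.2 + PySem.Str.len kv.1))).filter (pvDis R)) kws := by
  induction dct generalizing kws R with
  | nil => simp [pvALoop, pvSieve]

  | cons kv rest ih =>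
    obtain ⟨k, v⟩ := kv
    simp only [List.map_cons, pvALoop, List.filter_cons]
    by_cases hA : PySem.Set.inter (PySem.Set.ofList (PySem.List.pyRange v (v + PySem.Str.len k) 1)) R ≠ []
    · -- A skips; the head is filtered out on B's side
      have hd : pvDis R (k, v, v + PySem.Str.len k) = false :=
        Bool.eq_false_iff.mpr ((pvCond_iff R k v (v + PySem.Str.len k)).mp hA)
      rw [if_pos hA, hd, if_neg (by simp)]
      exact ih kws R
    · -- A accepts; the head survives the filter and the sieve steps
      have hd : pvDis R (k, v, v + PySem.Str.len k) = true := by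
        by_contra hc
        exact hA ((pvCond_iff R k v (v + PySem.Str.len k)).mpr hc)
      rw [if_neg hA, hd, if_pos (by simp), pvSieve_cons, ih]
      congr 1
      rw [List.filter_filter]
      apply List.filter_congr
      intro t _
      rw [pvDis_union]

-- ===== VERDICT (by name: the statement is the Claim_ definition above) =====
theorem remove_overlapped_spec : Claim_equal_remove_overlapped := by
  intro dct _
  unfold Spec_remove_overlapped remove_overlapped remove_overlapped_alt
  rw [pvLoop_eq]
  congr 1
  rw [List.filter_eq_self]
  intro t _
  rw [pvDis_spec]
  intro x _ _ hx
  simp [PySem.Set.empty] at hx
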